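-- pv_equiv track=rewrite | github.com/geoffreyweal/RSGC | RSGC/RSGC/remove_sidechains_methods/remove_aliphatic_sidegroups_methods/determine_atoms_between_moieties_to_keep.py | obtain_shortest_unique_paths_from_moiety_to_moiety
-- ===== SOURCE A (Python) =====
-- def obtain_shortest_unique_paths_from_moiety_to_moiety(original_paths_from_moiety_to_moiety):
-- 	"""
-- 	This method will determine which paths in the original_paths_from_moiety_to_moiety are the shortest unique paths.
--
-- 	Parameters
-- 	----------
-- 	original_paths_from_moiety_to_moiety : list of ints
-- 		These are all the path that have been found from one moiety to the same moiety or a different moiety.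
--
-- 	Returns
-- 	-------
-- 	shortest_unique_paths_from_moiety_to_moiety : list of ints
-- 		These are all the unique paths in the original_paths_from_moiety_to_moiety that are shortest.
-- 	"""
--
-- 	# First, sort the paths_from_moiety_to_moiety list from shortest to longest path.
-- 	paths_from_moiety_to_moiety = sorted(original_paths_from_moiety_to_moiety, key=lambda x: len(x))
--
-- 	# Second, obtain the shortest unique paths from one moiety to the same moiety or a different moiety.
-- 	shortest_unique_paths_from_moiety_to_moiety = []
-- 	for path in paths_from_moiety_to_moiety:
-- 		for shortest_unique_path in shortest_unique_paths_from_moiety_to_moiety: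
-- 			# 2.1.1: Determine if path has a similar start and end as shortest_unique_path
-- 			start_of_path = compare_lists(path, shortest_unique_path, compare='start')
-- 			end_of_path   = compare_lists(path, shortest_unique_path, compare='end')
-- 			if (len(start_of_path) > 0) and (len(end_of_path) > 0):
-- 				# If path has a similar start and end to shortest_unique_path,
-- 				# then path is not the shortest unique path
-- 				break
-- 		else:
-- 			# 2.2.1: If here, could not find a shortest unique path that starts with path[0] and ends with path[-1].
-- 			# Add path to shortest_unique_paths_from_moiety_to_moiety
-- 			shortest_unique_paths_from_moiety_to_moiety.append(path)
--
-- 	# Third, return all the unique paths in the original_paths_from_moiety_to_moiety that are shortest.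
-- 	return shortest_unique_paths_from_moiety_to_moiety
--
-- def compare_lists(original_first_list, original_second_list, compare='start'):
-- 	"""
-- 	This method is designed to compare two lists together to see how much of the start and end of the list is the same.
--
-- 	Parameters
-- 	----------
-- 	original_first_list : list of ints
-- 		This is the first list to compare
-- 	original_second_list : list of ints
-- 		This is the second list to compare
-- 	compare : str
-- 		If compare='start', compare the starts of the two lists. If compare='end', compare the ends of the two lists.
--
-- 	Returns
-- 	-------
-- 	same_entries_of_list : list of ints
-- 		This is the start or the ends of the two lists that are the same.
-- 	"""
--
-- 	# First, determine if you want to compare the lists from the starts or ends.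
-- 	if compare == 'start':
-- 		first_list  = original_first_list
-- 		second_list = original_second_list
-- 	elif compare == 'end':
-- 		first_list  = original_first_list[::-1]
-- 		second_list = original_second_list[::-1]
--
-- 	# Second, determine how much of the start or end of the two lists are the same.
-- 	same_entries_of_list = []
-- 	for first_entry, second_entry in zip(first_list, second_list):
-- 		if first_entry == second_entry:
-- 			same_entries_of_list.append(first_entry)
-- 		else:
-- 			break
--
-- 	# Third, if you are comparing the ends, reverse the same_entries_of_list list.
-- 	if compare == 'end':
-- 		same_entries_of_list = same_entries_of_list[::-1]
--
-- 	# Fourth, return the same_entries_of_list list.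
-- 	return same_entries_of_list
-- ===== SOURCE B (Python) =====
-- def obtain_shortest_unique_paths_from_moiety_to_moiety(original_paths_from_moiety_to_moiety):
-- 	# One pass over the length-sorted paths with a dict keyed by (first, last)
-- 	# element, keeping the first (= shortest) path per endpoint pair; empty
-- 	# paths have no endpoints and are all kept (they sort to the front).
-- 	first_path_by_endpoints = {}
-- 	number_of_empty_paths = 0
-- 	for path in sorted(original_paths_from_moiety_to_moiety, key=len):
-- 		if not path:
-- 			number_of_empty_paths += 1
-- 		else:
-- 			endpoints = (path[0], path[-1])
-- 			if endpoints not in first_path_by_endpoints: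
-- 				first_path_by_endpoints[endpoints] = path
-- 	return [[]] * number_of_empty_paths + list(first_path_by_endpoints.values())
-- ===== Notes on version B (the rewrite author's own statement) =====
-- stated objective: faster
-- what changed: Replaced the inner scan over all kept paths (each doing element-wise prefix/suffix comparison) with a single dict lookup keyed by the (first, last) endpoint pair, with empty paths counted separately.
import Mathlib
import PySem

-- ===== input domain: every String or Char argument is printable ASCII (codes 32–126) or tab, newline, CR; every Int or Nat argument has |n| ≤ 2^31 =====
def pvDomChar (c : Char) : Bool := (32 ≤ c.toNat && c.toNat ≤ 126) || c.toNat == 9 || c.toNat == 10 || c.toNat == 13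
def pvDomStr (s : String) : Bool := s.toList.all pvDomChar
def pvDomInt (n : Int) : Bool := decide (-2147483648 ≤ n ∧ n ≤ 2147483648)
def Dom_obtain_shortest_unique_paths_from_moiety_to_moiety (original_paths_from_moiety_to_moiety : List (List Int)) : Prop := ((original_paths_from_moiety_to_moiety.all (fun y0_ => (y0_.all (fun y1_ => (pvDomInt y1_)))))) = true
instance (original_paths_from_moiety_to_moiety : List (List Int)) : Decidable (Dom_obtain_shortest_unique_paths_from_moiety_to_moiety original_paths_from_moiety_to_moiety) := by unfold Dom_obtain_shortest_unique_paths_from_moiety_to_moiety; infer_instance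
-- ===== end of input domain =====

-- B replaces A's inner scan over all kept paths with a single dict lookup keyed by the
-- (first, last) endpoint pair (empty paths counted separately): asymptotically faster.


-- ===== PORT A =====
-- the zip loop of compare_lists (appends while entries match, breaks at the first mismatch)
def compare_lists_loop (pairs : List (Int × Int)) (same_entries_of_list : List Int) : List Int :=
  match pairs with
  | [] => same_entries_of_list
  | (first_entry, second_entry) :: rest =>
      if first_entry = second_entry then
        compare_lists_loop rest (same_entries_of_list ++ [first_entry])
      else same_entries_of_list

def compare_lists (original_first_list original_second_list : List Int) (compare : String) : List Int :=
  -- [::-1] is List.reverse (PySem.List.slice?_none_none_neg_one)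
  let fs : List Int × List Int :=
    if compare = "start" then (original_first_list, original_second_list)
    else if compare = "end" then (original_first_list.reverse, original_second_list.reverse)
    else ([], [])  -- unreachable: A only calls with "start"/"end" (Python would raise UnboundLocalError)
  let same_entries_of_list := compare_lists_loop (fs.1.zip fs.2) []
  if compare = "end" then same_entries_of_list.reverse else same_entries_of_list

-- the inner 'for … else' loop of A: true = some kept path shares a start and an end (break)
def find_similar_path (path : List Int) (shortest_unique_paths : List (List Int)) : Bool :=
  match shortest_unique_paths with
  | [] => false
  | shortest_unique_path :: rest =>
      let start_of_path := compare_lists path shortest_unique_path "start"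
      let end_of_path := compare_lists path shortest_unique_path "end"
      if 0 < start_of_path.length ∧ 0 < end_of_path.length then true
      else find_similar_path path rest

def obtain_shortest_unique_paths_from_moiety_to_moiety (original_paths_from_moiety_to_moiety : List (List Int)) : List (List Int) :=
  let paths_from_moiety_to_moiety := PySem.List.sorted original_paths_from_moiety_to_moiety (fun x => (x.length : Int)) false
  paths_from_moiety_to_moiety.foldl
    (fun acc path => if find_similar_path path acc then acc else acc ++ [path])
    []

-- ===== PORT B =====
-- one step of B's loop: count empty paths; otherwise first-wins insert keyed by (path[0], path[-1])
def alt_step (st : PySem.Dict (Int × Int) (List Int) × Nat) (path : List Int) :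
    PySem.Dict (Int × Int) (List Int) × Nat :=
  if path.isEmpty then (st.1, st.2 + 1)
  else
    -- path ≠ [] here, so headD/getLastD are exactly path[0] and path[-1]
    let endpoints : Int × Int := (path.headD 0, path.getLastD 0)
    if st.1.contains endpoints then st else (st.1.insert endpoints path, st.2)

def obtain_shortest_unique_paths_from_moiety_to_moiety_alt (original_paths_from_moiety_to_moiety : List (List Int)) : List (List Int) :=
  let st := (PySem.List.sorted original_paths_from_moiety_to_moiety (fun x => (x.length : Int)) false).foldl
    alt_step (PySem.Dict.empty, 0)
  List.replicate st.2 ([] : List Int) ++ st.1.values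

-- ===== PRECONDITION & SPEC =====
def Spec_obtain_shortest_unique_paths_from_moiety_to_moiety (original_paths_from_moiety_to_moiety : List (List Int)) (out : List (List Int)) : Prop := out = obtain_shortest_unique_paths_from_moiety_to_moiety_alt original_paths_from_moiety_to_moiety
instance (original_paths_from_moiety_to_moiety : List (List Int)) (out : List (List Int)) : Decidable (Spec_obtain_shortest_unique_paths_from_moiety_to_moiety original_paths_from_moiety_to_moiety out) := by unfold Spec_obtain_shortest_unique_paths_from_moiety_to_moiety; infer_instance

-- ===== CLAIM (what is proved, stated in full; the proofs are below) =====
def Claim_equal_obtain_shortest_unique_paths_from_moiety_to_moiety : Prop := ∀ (original_paths_from_moiety_to_moiety : List (List Int)), Dom_obtain_shortest_unique_paths_from_moiety_to_moiety original_paths_from_moiety_to_moiety → Spec_obtain_shortest_unique_paths_from_moiety_to_moiety original_paths_from_moiety_to_moiety (obtain_shortest_unique_paths_from_moiety_to_moiety original_paths_from_moiety_to_moiety)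

-- ===== LEMMAS AND PROOFS =====

-- unfoldings of compare_lists at the two literal modes A uses
theorem compare_lists_start_eq (p q : List Int) :
    compare_lists p q "start" = compare_lists_loop (p.zip q) [] := by
  simp [compare_lists]

theorem compare_lists_end_eq (p q : List Int) :
    compare_lists p q "end" = (compare_lists_loop (p.reverse.zip q.reverse) []).reverse := by
  simp [compare_lists]

-- the accumulator of compare_lists_loop only grows
theorem compare_lists_loop_length (pairs : List (Int × Int)) (acc : List Int) :
    acc.length ≤ (compare_lists_loop pairs acc).length := by
  induction pairs generalizing acc with
  | nil => simp [compare_lists_loop]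
  | cons hd tl ih =>
      obtain ⟨f, s⟩ := hd
      simp only [compare_lists_loop]
      split
      · exact le_trans (by simp) (ih (acc ++ [f]))
      · exact le_refl _

-- the zip loop returns a nonempty list exactly when the first pair matches
theorem compare_lists_loop_pos_iff (f s : Int) (rest : List (Int × Int)) :
    0 < (compare_lists_loop ((f, s) :: rest) []).length ↔ f = s := by
  simp only [compare_lists_loop]
  split
  · rename_i h
    refine ⟨fun _ => h, fun _ => ?_⟩
    exact lt_of_lt_of_le (by simp) (compare_lists_loop_length rest ([] ++ [f]))
  · simp_all

theorem compare_lists_nil_right (p : List Int) (c : String) : compare_lists p [] c = [] := by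
  unfold compare_lists
  split_ifs <;> simp [compare_lists_loop]

-- A's "same start" test is: both nonempty and equal first elements
theorem compare_start_pos_iff (p q : List Int) (hp : p ≠ []) (hq : q ≠ []) :
    0 < (compare_lists p q "start").length ↔ p.headD 0 = q.headD 0 := by
  obtain ⟨a, p', rfl⟩ := List.exists_cons_of_ne_nil hp
  obtain ⟨b, q', rfl⟩ := List.exists_cons_of_ne_nil hq
  rw [compare_lists_start_eq, List.zip_cons_cons, compare_lists_loop_pos_iff]
  simp

-- A's "same end" test is: both nonempty and equal last elements
theorem compare_end_pos_iff (p q : List Int) (hp : p ≠ []) (hq : q ≠ []) :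
    0 < (compare_lists p q "end").length ↔ p.getLastD 0 = q.getLastD 0 := by
  have hpr : p.reverse ≠ [] := by simpa using hp
  have hqr : q.reverse ≠ [] := by simpa using hq
  obtain ⟨a, p', hp'⟩ := List.exists_cons_of_ne_nil hpr
  obtain ⟨b, q', hq'⟩ := List.exists_cons_of_ne_nil hqr
  rw [compare_lists_end_eq, List.length_reverse, hp', hq', List.zip_cons_cons,
    compare_lists_loop_pos_iff]
  have ha : p.getLastD 0 = a := by
    have : p.getLast? = some a := by rw [← List.head?_reverse, hp']; rfl
    simp [List.getLastD_eq_getLast?, this]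
  have hb : q.getLastD 0 = b := by
    have : q.getLast? = some b := by rw [← List.head?_reverse, hq']; rfl
    simp [List.getLastD_eq_getLast?, this]
  rw [ha, hb]

-- find_similar_path never fires for an empty path
theorem find_similar_nil (kept : List (List Int)) : find_similar_path [] kept = false := by
  induction kept with
  | nil => rfl
  | cons q rest ih =>
      simp only [find_similar_path]
      rw [compare_lists_start_eq]
      simp [compare_lists_loop, ih]

-- characterisation of A's break condition for a nonempty path
theorem find_similar_iff (p : List Int) (hp : p ≠ []) (kept : List (List Int)) :
    find_similar_path p kept = true ↔
      ∃ q ∈ kept, q ≠ [] ∧ q.headD 0 = p.headD 0 ∧ q.getLastD 0 = p.getLastD 0 := by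
  induction kept with
  | nil => simp [find_similar_path]
  | cons q rest ih =>
      simp only [find_similar_path]
      by_cases hq : q = []
      · subst hq
        rw [compare_lists_nil_right, compare_lists_nil_right]
        simpa using ih
      · simp only [compare_start_pos_iff p q hp hq, compare_end_pos_iff p q hp hq]
        by_cases hc : p.headD 0 = q.headD 0 ∧ p.getLastD 0 = q.getLastD 0
        · simp only [if_pos hc]
          exact ⟨fun _ => ⟨q, by simp, hq, hc.1.symm, hc.2.symm⟩, fun _ => by simp⟩
        · simp only [if_neg hc]
          rw [ih]
          constructor
          · rintro ⟨w, hw, h⟩; exact ⟨w, by simp [hw], h⟩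
          · rintro ⟨w, hw, hw0, h1, h2⟩
            rcases List.mem_cons.mp hw with rfl | hw'
            · exact absurd ⟨h1.symm, h2.symm⟩ hc
            · exact ⟨w, hw', hw0, h1, h2⟩

-- dict membership of an endpoint key = some stored path has those endpoints (under the invariant)
theorem contains_iff_exists_value (d : PySem.Dict (Int × Int) (List Int)) (k : Int × Int)
    (hinv : ∀ kp ∈ d.items, kp.2 ≠ [] ∧ kp.1 = (kp.2.headD 0, kp.2.getLastD 0)) :
    d.contains k = true ↔
      ∃ q ∈ d.values, q ≠ [] ∧ (q.headD 0, q.getLastD 0) = k := by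
  rw [PySem.Dict.contains_iff_mem_keys]
  simp only [PySem.Dict.keys, PySem.Dict.values, List.mem_map]
  constructor
  · rintro ⟨kp, hkp, rfl⟩
    exact ⟨kp.2, ⟨kp, hkp, rfl⟩, (hinv kp hkp).1, ((hinv kp hkp).2).symm⟩
  · rintro ⟨q, ⟨kp, hkp, rfl⟩, _, hk⟩
    exact ⟨kp, hkp, ((hinv kp hkp).2).trans hk⟩

-- the core invariant: both folds over the length-sorted list stay in lockstep
theorem fold_agree (r : List (List Int)) (d : PySem.Dict (Int × Int) (List Int)) (e : Nat)
    (hpw : r.Pairwise (fun a b => (a.length : Int) ≤ (b.length : Int)))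
    (hinv : ∀ kp ∈ d.items, kp.2 ≠ [] ∧ kp.1 = (kp.2.headD 0, kp.2.getLastD 0))
    (hemp : d.items = [] ∨ ∀ p ∈ r, p ≠ []) :
    r.foldl (fun acc path => if find_similar_path path acc then acc else acc ++ [path])
        (List.replicate e [] ++ d.values)
      = List.replicate (r.foldl alt_step (d, e)).2 [] ++ (r.foldl alt_step (d, e)).1.values := by
  induction r generalizing d e with
  | nil => simp
  | cons p r' ih =>
      have hpw' := (List.pairwise_cons.mp hpw).2
      have hple := (List.pairwise_cons.mp hpw).1
      simp only [List.foldl_cons]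
      by_cases hp : p = []
      · subst hp
        have hd : d.items = [] := by
          rcases hemp with h | h
          · exact h
          · exact absurd rfl (h [] (by simp))
        have hv : d.values = [] := by simp [PySem.Dict.values, hd]
        rw [show (if find_similar_path [] (List.replicate e [] ++ d.values) = true
              then List.replicate e ([] : List Int) ++ d.values
              else (List.replicate e [] ++ d.values) ++ [[]])
            = List.replicate (e + 1) ([] : List Int) ++ d.values from by
          rw [find_similar_nil]; simp [hv, List.replicate_succ']]
        rw [show alt_step (d, e) [] = (d, e + 1) from by simp [alt_step]]
        exact ih d (e + 1) hpw' hinv (Or.inl hd)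
      · have hr' : ∀ b ∈ r', b ≠ [] := by
          intro b hb hbnil
          have h1 := hple b hb
          rw [hbnil] at h1
          simp only [List.length_nil] at h1
          have h2 : 0 < p.length := List.length_pos_of_ne_nil hp
          omega
        have hbreak : find_similar_path p (List.replicate e [] ++ d.values) = true
            ↔ d.contains (p.headD 0, p.getLastD 0) = true := by
          rw [find_similar_iff p hp,
            contains_iff_exists_value d _ hinv]
          constructor
          · rintro ⟨q, hq, hq0, h1, h2⟩
            rcases List.mem_append.mp hq with h | h
            · exact absurd (List.eq_of_mem_replicate h) hq0
            · exact ⟨q, h, hq0, by rw [h1, h2]⟩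
          · rintro ⟨q, hq, hq0, hk⟩
            exact ⟨q, List.mem_append.mpr (Or.inr hq), hq0,
              congrArg Prod.fst hk, congrArg Prod.snd hk⟩
        have hstep : alt_step (d, e) p
            = if d.contains (p.headD 0, p.getLastD 0) then (d, e)
              else (d.insert (p.headD 0, p.getLastD 0) p, e) := by
          simp [alt_step, List.isEmpty_iff, hp]
        by_cases hc : d.contains (p.headD 0, p.getLastD 0) = true
        · rw [if_pos (hbreak.mpr hc), hstep, if_pos hc]
          exact ih d e hpw' hinv (Or.inr hr')
        · rw [if_neg (by rw [hbreak]; exact hc), hstep,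
            if_neg (by exact hc)]
          have hitems := PySem.Dict.items_insert_of_not_contains (d := d)
            (k := ((p.headD 0 : Int), p.getLastD 0)) (v := p) (by simpa using hc)
          have hvals : (d.insert (p.headD 0, p.getLastD 0) p).values = d.values ++ [p] := by
            simp only [PySem.Dict.values, hitems, List.map_append, List.map_cons, List.map_nil]
          have hinv' : ∀ kp ∈ (d.insert (p.headD 0, p.getLastD 0) p).items,
              kp.2 ≠ [] ∧ kp.1 = (kp.2.headD 0, kp.2.getLastD 0) := by
            intro kp hkp
            rw [hitems, List.mem_append] at hkp
            rcases hkp with h | h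
            · exact hinv kp h
            · simp only [List.mem_singleton] at h
              subst h
              exact ⟨hp, rfl⟩
          have hrw : (List.replicate e ([] : List Int) ++ d.values) ++ [p]
              = List.replicate e ([] : List Int)
                ++ (d.insert (p.headD 0, p.getLastD 0) p).values := by
            rw [hvals, List.append_assoc]
          rw [hrw]
          exact ih _ e hpw' hinv' (Or.inr hr')

-- ===== VERDICT (by name: the statement is the Claim_ definition above) =====
theorem obtain_shortest_unique_paths_from_moiety_to_moiety_spec : Claim_equal_obtain_shortest_unique_paths_from_moiety_to_moiety := by
  intro xs _
  unfold Spec_obtain_shortest_unique_paths_from_moiety_to_moiety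
  unfold obtain_shortest_unique_paths_from_moiety_to_moiety
    obtain_shortest_unique_paths_from_moiety_to_moiety_alt
  have hpw := PySem.List.sorted_pairwise (xs := xs) (key := fun x : List Int => (x.length : Int))
  have := fold_agree (PySem.List.sorted xs (fun x => (x.length : Int)) false)
    PySem.Dict.empty 0 hpw (by simp [PySem.Dict.empty]) (Or.inl rfl)
  simpa using this
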